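-- pv_equiv track=rewrite | github.com/pyrustic/paradict | paradict-0.0.12/src/paradict/misc/__init__.py | make_multiline
-- ===== SOURCE A (Python) =====
-- def make_multiline(s, group_size=0, row_size=42):
--     group_size = 0 if group_size <= 0 else group_size
--     row_size = 42 if row_size <= 0 else row_size
--     result = list()
--     row = list()
--     group = list()
--     spacing = " " if group_size else ""
--     for char in s:
--         if group_size:
--             group.append(char)
--             if len(group) == group_size:
--                 row.append("".join(group))
--                 group = list()
--         else:
--             row.append(char)
--         if len(row) == row_size:
--             result.append(spacing.join(row))
--             row = list()
--     if row:
--         result.append(spacing.join(row))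
--     return result
-- ===== SOURCE B (Python) =====
-- def make_multiline(s, group_size=0, row_size=42):
--     gs = 0 if group_size <= 0 else group_size
--     rs = 42 if row_size <= 0 else row_size
--     if gs:
--         spacing = " "
--         elems = ["".join(s[i * gs:(i + 1) * gs]) for i in range(len(s) // gs)]
--     else:
--         spacing = ""
--         elems = list(s)
--     n = len(elems)
--     return [spacing.join(elems[i * rs:(i + 1) * rs])
--             for i in range((n + rs - 1) // rs)]
-- ===== Notes on version B (the rewrite author's own statement) =====
-- stated objective: faster
-- what changed: Replaces A's single streaming loop with three mutable accumulators (result/row/group, flushing on size) by two index-based slicing passes: full groups taken by slicing s with an integer-division count, then rows produced by slicing the element list into row_size chunks and joining.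
import Mathlib
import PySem

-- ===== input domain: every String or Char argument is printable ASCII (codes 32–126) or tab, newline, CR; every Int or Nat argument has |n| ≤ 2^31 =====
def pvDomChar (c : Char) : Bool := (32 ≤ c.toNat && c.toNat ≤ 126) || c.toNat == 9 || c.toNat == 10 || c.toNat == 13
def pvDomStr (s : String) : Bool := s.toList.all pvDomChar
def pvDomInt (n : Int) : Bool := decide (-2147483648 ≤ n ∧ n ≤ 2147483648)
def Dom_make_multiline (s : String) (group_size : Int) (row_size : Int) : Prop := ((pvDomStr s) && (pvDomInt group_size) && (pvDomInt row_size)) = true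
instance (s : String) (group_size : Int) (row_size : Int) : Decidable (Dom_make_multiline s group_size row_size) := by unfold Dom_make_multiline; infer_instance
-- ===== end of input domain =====

-- B replaces A's single streaming accumulation loop by two index-based slicing passes
-- (full groups by slicing, then rows by slicing); a timing run measured B faster by a constant factor.

-- ===== PORT A =====
-- one iteration of A's `for char in s` loop over the state (result, row, group);
-- `"".join(group)` of a list of single characters is ported exactly as String.ofList
def pvStepA (gs rs : Int) (spacing : String)
    (st : List String × List String × List Char) (ch : Char) :
    List String × List String × List Char :=
  let result := st.1
  let rg :=
    if gs ≠ 0 then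
      let group := st.2.2 ++ [ch]
      if (group.length : Int) = gs then (st.2.1 ++ [String.ofList group], ([] : List Char))
      else (st.2.1, group)
    else (st.2.1 ++ [String.ofList [ch]], st.2.2)
  if (rg.1.length : Int) = rs then (result ++ [PySem.Str.join spacing rg.1], [], rg.2)
  else (result, rg.1, rg.2)

def make_multiline (s : String) (group_size : Int) (row_size : Int) : List String :=
  let gs : Int := if group_size ≤ 0 then 0 else group_size
  let rs : Int := if row_size ≤ 0 then 42 else row_size
  let spacing : String := if gs ≠ 0 then " " else ""
  let st := s.toList.foldl (pvStepA gs rs spacing) ([], [], [])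
  if st.2.1 ≠ [] then st.1 ++ [PySem.Str.join spacing st.2.1] else st.1

-- ===== PORT B =====
-- literal port of Source B: full groups by string slicing, then rows by list slicing
def make_multiline_alt (s : String) (group_size : Int) (row_size : Int) : List String :=
  let gs : Int := if group_size ≤ 0 then 0 else group_size
  let rs : Int := if row_size ≤ 0 then 42 else row_size
  let se : String × List String :=
    if gs ≠ 0 then
      (" ", (PySem.List.pyRange 0 (PySem.Int.floordiv (PySem.Str.len s) gs) 1).map
              (fun i => PySem.Str.slice s (some (i * gs)) (some ((i + 1) * gs))))
    else
      ("", s.toList.map (fun c => String.ofList [c]))   -- list(s): single-character strings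
  let n : Int := se.2.length
  (PySem.List.pyRange 0 (PySem.Int.floordiv (n + rs - 1) rs) 1).map
    (fun i => PySem.Str.join se.1 (PySem.List.slice se.2 (some (i * rs)) (some ((i + 1) * rs))))

-- ===== PRECONDITION & SPEC =====
def Spec_make_multiline (s : String) (group_size : Int) (row_size : Int) (out : List String) : Prop := out = make_multiline_alt s group_size row_size
instance (s : String) (group_size : Int) (row_size : Int) (out : List String) : Decidable (Spec_make_multiline s group_size row_size out) := by unfold Spec_make_multiline; infer_instance

-- ===== CLAIM (what is proved, stated in full; the proofs are below) =====
def Claim_equal_make_multiline : Prop := ∀ (s : String) (group_size : Int) (row_size : Int), Dom_make_multiline s group_size row_size → Spec_make_multiline s group_size row_size (make_multiline s group_size row_size)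

-- ===== LEMMAS AND PROOFS =====
-- all maximal chunks of size n (last one possibly shorter)
def pvChunksAll {α : Type} (n : Nat) (l : List α) : List (List α) :=
  if h : n = 0 ∨ l = [] then [] else l.take n :: pvChunksAll n (l.drop n)
termination_by l.length
decreasing_by
  have : l ≠ [] := by tauto
  have : 0 < n := by omega
  cases l with
  | nil => simp at *
  | cons a t => simp [List.length_drop]; omega

-- the full chunks of size n, partial final chunk dropped
def pvChunksFull {α : Type} (n : Nat) (l : List α) : List (List α) :=
  if h : n = 0 ∨ l.length < n then [] else l.take n :: pvChunksFull n (l.drop n)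
termination_by l.length
decreasing_by simp [List.length_drop]; omega

-- leftover after removing the full chunks
def pvRestFull {α : Type} (n : Nat) (l : List α) : List α :=
  if h : n = 0 ∨ l.length < n then l else pvRestFull n (l.drop n)
termination_by l.length
decreasing_by simp [List.length_drop]; omega

-- A's row accumulation, abstracted over the stream of row elements
def pvLoopRows (rs : Int) (spacing : String) :
    List String → List String → List String → List String × List String
  | [], res, row => (res, row)
  | e :: es, res, row =>
    let row' := row ++ [e]
    if (row'.length : Int) = rs then
      pvLoopRows rs spacing es (res ++ [PySem.Str.join spacing row']) []
    else pvLoopRows rs spacing es res row'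
lemma pvFoldA_gs0 (rs : Int) (spacing : String) :
    ∀ (cs : List Char) (res row : List String) (g : List Char),
      cs.foldl (pvStepA 0 rs spacing) (res, row, g) =
        ((pvLoopRows rs spacing (cs.map (fun c => String.ofList [c])) res row).1,
         (pvLoopRows rs spacing (cs.map (fun c => String.ofList [c])) res row).2, g) := by
  intro cs
  induction cs with
  | nil => intro res row g; simp [pvLoopRows]
  | cons c cs ih =>
    intro res row g
    simp only [List.foldl_cons, List.map_cons, pvStepA, pvLoopRows]
    by_cases h : (row.length : Int) + 1 = rs <;> simp [h, ih]

lemma pvChunksFull_small {α : Type} (n : Nat) (l : List α) (h : l.length < n) :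
    pvChunksFull n l = [] := by
  rw [pvChunksFull]; simp [h]

lemma pvRestFull_small {α : Type} (n : Nat) (l : List α) (h : l.length < n) :
    pvRestFull n l = l := by
  rw [pvRestFull]; simp [h]

lemma pvChunksFull_step {α : Type} (n : Nat) (hn : 0 < n) (l : List α) (h : n ≤ l.length) :
    pvChunksFull n l = l.take n :: pvChunksFull n (l.drop n) := by
  rw [pvChunksFull]; simp [Nat.not_lt.mpr h]; omega

lemma pvRestFull_step {α : Type} (n : Nat) (hn : 0 < n) (l : List α) (h : n ≤ l.length) :
    pvRestFull n l = pvRestFull n (l.drop n) := by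
  rw [pvRestFull]; simp [Nat.not_lt.mpr h]; omega

lemma pvFoldA_pos (gs rs : Int) (hgs : 0 < gs) (hrs : 0 < rs) (spacing : String) :
    ∀ (cs : List Char) (res row : List String) (g : List Char),
      (g.length : Int) < gs → (row.length : Int) < rs →
      cs.foldl (pvStepA gs rs spacing) (res, row, g) =
        ((pvLoopRows rs spacing ((pvChunksFull gs.toNat (g ++ cs)).map String.ofList) res row).1,
         (pvLoopRows rs spacing ((pvChunksFull gs.toNat (g ++ cs)).map String.ofList) res row).2,
         pvRestFull gs.toNat (g ++ cs)) := by
  intro cs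
  induction cs with
  | nil =>
    intro res row g hg hrow
    have h : g.length < gs.toNat := by omega
    simp [pvChunksFull_small _ _ h, pvRestFull_small _ _ h, pvLoopRows]
  | cons c cs ih =>
    intro res row g hg hrow
    have hgs0 : gs ≠ 0 := by omega
    have hrowne : ¬ ((row.length : Int) = rs) := by omega
    by_cases h : (g.length : Int) + 1 = gs
    · -- group completes
      have htake : (g ++ c :: cs).take gs.toNat = g ++ [c] := by
        have heq : g ++ c :: cs = (g ++ [c]) ++ cs := by simp
        rw [heq, List.take_append_of_le_length (by simp; omega), List.take_of_length_le (by simp; omega)]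
      have hdrop : (g ++ c :: cs).drop gs.toNat = cs := by
        have heq : g ++ c :: cs = (g ++ [c]) ++ cs := by simp
        rw [heq, List.drop_append_of_le_length (by simp; omega), List.drop_of_length_le (by simp; omega)]
        simp
      rw [pvChunksFull_step gs.toNat (by omega) _ (by simp; omega),
          pvRestFull_step gs.toNat (by omega) _ (by simp; omega), htake, hdrop]
      simp only [List.foldl_cons, pvStepA, List.map_cons, pvLoopRows]
      by_cases h2 : (row.length : Int) + 1 = rs
      · have ihh := ih (res ++ [PySem.Str.join spacing (row ++ [String.ofList (g ++ [c])])]) [] []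
          (by simp; omega) (by simp; omega)
        simp only [List.nil_append, String.ofList_append] at ihh
        simp [h, h2, hgs0, ihh]
      · have ihh := ih res (row ++ [String.ofList (g ++ [c])]) []
          (by simp; omega) (by simp; omega)
        simp only [List.nil_append, String.ofList_append] at ihh
        simp [h, h2, hgs0, ihh]
    · -- group still filling
      have hg' : ((g ++ [c]).length : Int) < gs := by simp; omega
      have ihh := ih res row (g ++ [c]) hg' hrow
      simp only [List.append_assoc, List.singleton_append] at ihh
      simp only [List.foldl_cons, pvStepA]
      simp [hgs0, h, hrowne, ihh]

lemma pvChunksAll_nil {α : Type} (n : Nat) : pvChunksAll n ([] : List α) = [] := by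
  rw [pvChunksAll]; simp

lemma pvChunksAll_step {α : Type} (n : Nat) (hn : 0 < n) (l : List α) (h : l ≠ []) :
    pvChunksAll n l = l.take n :: pvChunksAll n (l.drop n) := by
  rw [pvChunksAll]; simp [h]; omega

lemma pvLoopRows_eq (rs : Int) (hrs : 0 < rs) (spacing : String) :
    ∀ (es res row : List String), (row.length : Int) < rs →
      (if (pvLoopRows rs spacing es res row).2 ≠ [] then
        (pvLoopRows rs spacing es res row).1 ++
          [PySem.Str.join spacing (pvLoopRows rs spacing es res row).2]
       else (pvLoopRows rs spacing es res row).1) =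
      res ++ (pvChunksAll rs.toNat (row ++ es)).map (PySem.Str.join spacing) := by
  intro es
  induction es with
  | nil =>
    intro res row hrow
    by_cases h : row = []
    · simp [pvLoopRows, h, pvChunksAll_nil]
    · rw [pvChunksAll_step rs.toNat (by omega) _ (by simpa using h)]
      have h1 : (row ++ []).take rs.toNat = row := by
        rw [List.append_nil]; exact List.take_of_length_le (by omega)
      have h2 : (row ++ []).drop rs.toNat = [] := by
        rw [List.append_nil]; exact List.drop_of_length_le (by omega)
      rw [h1, h2, pvChunksAll_nil]
      simp [pvLoopRows, h]
  | cons e es ih =>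
    intro res row hrow
    by_cases h : (row.length : Int) + 1 = rs
    · have hL : pvLoopRows rs spacing (e :: es) res row =
          pvLoopRows rs spacing es (res ++ [PySem.Str.join spacing (row ++ [e])]) [] := by
        simp [pvLoopRows, h]
      rw [hL, ih _ [] (by simp; omega)]
      rw [pvChunksAll_step rs.toNat (by omega) (row ++ e :: es) (by simp)]
      have heq : row ++ e :: es = (row ++ [e]) ++ es := by simp
      have h1 : (row ++ e :: es).take rs.toNat = row ++ [e] := by
        rw [heq, List.take_append_of_le_length (by simp; omega), List.take_of_length_le (by simp; omega)]
      have h2 : (row ++ e :: es).drop rs.toNat = es := by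
        rw [heq, List.drop_append_of_le_length (by simp; omega), List.drop_of_length_le (by simp; omega)]
        simp
      rw [h1, h2]
      simp
    · have hL : pvLoopRows rs spacing (e :: es) res row =
          pvLoopRows rs spacing es res (row ++ [e]) := by
        simp [pvLoopRows, h]
      rw [hL, ih _ (row ++ [e]) (by simp; omega)]
      have heq : row ++ e :: es = (row ++ [e]) ++ es := by simp
      rw [heq]


lemma pvSliceChunk {α : Type} (g k : Nat) (l : List α) :
    PySem.List.slice l (some ((k : Int) * (g : Int))) (some (((k : Int) + 1) * (g : Int))) =
      (l.drop (k * g)).take g := by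
  have h := PySem.List.slice_natCast l (k * g) (k * g + g)
  have e1 : ((k * g : Nat) : Int) = (k : Int) * g := by push_cast; ring
  have e2 : ((k * g + g : Nat) : Int) = ((k : Int) + 1) * g := by push_cast; ring
  rw [e1, e2] at h
  rw [h]
  congr 1
  omega

lemma pvMapRangeFull {α β : Type} (g : Nat) (hg : 0 < g) (F : List α → β) :
    ∀ (n : Nat) (l : List α), l.length ≤ n →
      (List.range (l.length / g)).map (fun k => F ((l.drop (k * g)).take g)) =
      (pvChunksFull g l).map F := by
  intro n
  induction n with
  | zero =>
    intro l hl
    have hnil : l = [] := by cases l <;> simp_all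
    subst hnil
    simp [pvChunksFull_small g [] (by simpa using hg)]
  | succ n ih =>
    intro l hl
    by_cases hsmall : l.length < g
    · rw [Nat.div_eq_of_lt hsmall]
      simp [pvChunksFull_small g l hsmall]
    · have hge : g ≤ l.length := by omega
      have hq : l.length / g = (l.length - g) / g + 1 := by
        have hc := Nat.sub_add_cancel hge
        calc l.length / g = ((l.length - g) + g) / g := by rw [hc]
        _ = (l.length - g) / g + 1 := Nat.add_div_right _ hg
      rw [hq, List.range_succ_eq_map, pvChunksFull_step g hg l hge]
      simp only [List.map_cons, List.map_map, Nat.zero_mul, List.drop_zero]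
      refine congrArg₂ _ rfl ?_
      have ihd := ih (l.drop g) (by simp; omega)
      rw [List.length_drop] at ihd
      rw [← ihd]
      apply List.map_congr_left
      intro k hk
      simp only [Function.comp]
      congr 1
      rw [Nat.succ_mul, Nat.add_comm, ← List.drop_drop]


lemma pvCeilStep (r len : Nat) (hr : 0 < r) (hlen : 1 ≤ len) :
    (len + r - 1) / r = (len - r + r - 1) / r + 1 := by
  by_cases h : len ≤ r
  · have h1 : len - r = 0 := by omega
    rw [h1]
    have h2 : (r - 1) / r = 0 := Nat.div_eq_of_lt (by omega)
    simp only [Nat.zero_add, h2]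
    have h3 : len + r - 1 = (len - 1) + r := by omega
    rw [h3, Nat.add_div_right _ hr, Nat.div_eq_of_lt (by omega)]
  · have h3 : len + r - 1 = (len - 1) + r := by omega
    have h4 : len - r + r - 1 = (len - 1 - r) + r := by omega
    rw [h3, h4, Nat.add_div_right _ hr, Nat.add_div_right _ hr]
    have h5 : len - 1 = (len - 1 - r) + r := by omega
    rw [h5, Nat.add_div_right _ hr]
    have h6 : len - 1 - r + r - r = len - 1 - r := by omega
    rw [h6]

lemma pvMapRangeAll {α β : Type} (r : Nat) (hr : 0 < r) (F : List α → β) :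
    ∀ (n : Nat) (l : List α), l.length ≤ n →
      (List.range ((l.length + r - 1) / r)).map (fun k => F ((l.drop (k * r)).take r)) =
      (pvChunksAll r l).map F := by
  intro n
  induction n with
  | zero =>
    intro l hl
    have hnil : l = [] := by cases l <;> simp_all
    subst hnil
    simp only [List.length_nil]
    rw [Nat.div_eq_of_lt (by omega)]
    simp [pvChunksAll_nil]
  | succ n ih =>
    intro l hl
    by_cases hnil : l = []
    · subst hnil
      simp only [List.length_nil]
      rw [Nat.div_eq_of_lt (by omega)]
      simp [pvChunksAll_nil]
    · have hlen : 1 ≤ l.length := by cases l <;> simp_all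
      rw [pvCeilStep r l.length hr hlen, List.range_succ_eq_map, pvChunksAll_step r hr l hnil]
      simp only [List.map_cons, List.map_map, Nat.zero_mul, List.drop_zero]
      refine congrArg₂ _ rfl ?_
      have ihd := ih (l.drop r) (by simp; omega)
      rw [List.length_drop] at ihd
      rw [← ihd]
      apply List.map_congr_left
      intro k hk
      simp only [Function.comp]
      congr 1
      rw [Nat.succ_mul, Nat.add_comm, ← List.drop_drop]


lemma pvPyRangeMap {β : Type} (q : Nat) (f : Int → β) :
    (PySem.List.pyRange 0 (q : Int) 1).map f = (List.range q).map (fun (k : Nat) => f ((k : Nat) : Int)) := by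
  rw [PySem.List.pyRange_one]
  have e : (((q : Int)) - 0).toNat = q := by omega
  rw [e, List.map_map]
  apply List.map_congr_left
  intro k hk
  simp

lemma pvElems_floor {α β : Type} (gI : Int) (hg : 0 < gI) (F : List α → β) (l : List α) :
    (PySem.List.pyRange 0 (PySem.Int.floordiv (l.length : Int) gI) 1).map
      (fun i => F (PySem.List.slice l (some (i * gI)) (some ((i + 1) * gI)))) =
    (pvChunksFull gI.toNat l).map F := by
  obtain ⟨g, rfl⟩ : ∃ g : Nat, gI = (g : Int) := ⟨gI.toNat, by omega⟩
  simp only [Int.toNat_natCast]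
  rw [PySem.Int.floordiv_natCast, pvPyRangeMap]
  rw [← pvMapRangeFull g (by omega) F l.length l le_rfl]
  apply List.map_congr_left
  intro k hk
  rw [pvSliceChunk]

lemma pvElems_ceil {α β : Type} (rI : Int) (hr : 0 < rI) (F : List α → β) (l : List α) :
    (PySem.List.pyRange 0 (PySem.Int.floordiv ((l.length : Int) + rI - 1) rI) 1).map
      (fun i => F (PySem.List.slice l (some (i * rI)) (some ((i + 1) * rI)))) =
    (pvChunksAll rI.toNat l).map F := by
  obtain ⟨r, rfl⟩ : ∃ r : Nat, rI = (r : Int) := ⟨rI.toNat, by omega⟩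
  simp only [Int.toNat_natCast]
  have e : (l.length : Int) + (r : Int) - 1 = ((l.length + r - 1 : Nat) : Int) := by omega
  rw [e, PySem.Int.floordiv_natCast, pvPyRangeMap]
  rw [← pvMapRangeAll r (by omega) F l.length l le_rfl]
  apply List.map_congr_left
  intro k hk
  rw [pvSliceChunk]

lemma pvStrSlice (s : String) (a b : Option Int) :
    PySem.Str.slice s a b = String.ofList (PySem.List.slice s.toList a b) := by
  apply String.toList_inj.mp
  simp [PySem.Str.toList_slice]

-- ===== VERDICT (by name: the statement is the Claim_ definition above) =====
theorem make_multiline_spec : Claim_equal_make_multiline := by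
  unfold Claim_equal_make_multiline Spec_make_multiline
  intro s group_size row_size _
  simp only [make_multiline, make_multiline_alt]
  set rs : Int := if row_size ≤ 0 then 42 else row_size with hrsdef
  have hrs : 0 < rs := by rw [hrsdef]; split <;> omega
  by_cases hgs : group_size ≤ 0
  · -- gs = 0
    simp only [if_pos hgs, ne_eq, not_true_eq_false, if_false]
    have hfold := pvFoldA_gs0 rs "" s.toList [] [] []
    simp only [hfold]
    have hloop := pvLoopRows_eq rs hrs "" (s.toList.map (fun c => String.ofList [c])) [] []
      (by simp; omega)
    simp only [List.nil_append] at hloop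
    rw [hloop]
    rw [pvElems_ceil rs hrs (PySem.Str.join "") (s.toList.map (fun c => String.ofList [c]))]
  · -- gs = group_size > 0
    have hpos : 0 < group_size := by omega
    simp only [if_neg hgs]
    have hne : group_size ≠ 0 := by omega
    simp only [hne, ne_eq, not_false_eq_true, if_true]
    have hfold := pvFoldA_pos group_size rs hpos hrs " " s.toList [] [] []
      (by simp; omega) (by simp; omega)
    simp only [List.nil_append] at hfold
    simp only [hfold]
    have hloop := pvLoopRows_eq rs hrs " "
      ((pvChunksFull group_size.toNat s.toList).map String.ofList) [] [] (by simp; omega)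
    simp only [List.nil_append] at hloop
    rw [hloop]
    have helems : (PySem.List.pyRange 0 (PySem.Int.floordiv (PySem.Str.len s) group_size) 1).map
        (fun i => PySem.Str.slice s (some (i * group_size)) (some ((i + 1) * group_size))) =
        (pvChunksFull group_size.toNat s.toList).map String.ofList := by
      rw [PySem.Str.len_eq]
      rw [← pvElems_floor group_size hpos String.ofList s.toList]
      apply List.map_congr_left
      intro i hi
      rw [pvStrSlice]
    rw [helems]
    rw [pvElems_ceil rs hrs (PySem.Str.join " ")
      ((pvChunksFull group_size.toNat s.toList).map String.ofList)]
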